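-- pv_equiv track=rewrite | github.com/timecarlesk/mfar-pro | failure_analysis/type_b_memory/rerank/train_memory/run_stage1_stage2.py | _find_matching_rule
-- ===== SOURCE A (Python) =====
-- def _find_matching_rule(memory_context, answer_type, negation_pattern):
--     """Extract the matching rule from memory context for this answer_type + pattern."""
--     if not memory_context:
--         return None
--     # Look for line starting with "When answer_type=X and query contains Y"
--     best_match = None
--     for line in memory_context.split("\n"):
--         line_lower = line.lower().strip()
--         if not line_lower.startswith("when answer_type="):
--             continue
--         # Check if this rule matches
--         if answer_type and answer_type.lower() in line_lower:
--             if negation_pattern and negation_pattern.replace("_", " ") in line_lower: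
--                 # Exact match on both — collect this rule + next lines
--                 idx = memory_context.find(line)
--                 end = memory_context.find("\nWhen ", idx + 1)
--                 if end == -1:
--                     end = memory_context.find("\nImportant:", idx + 1)
--                 if end == -1:
--                     end = idx + 500
--                 best_match = memory_context[idx:end].strip()
--                 break
--             elif best_match is None:
--                 # Partial match on answer_type only
--                 idx = memory_context.find(line)
--                 end = memory_context.find("\nWhen ", idx + 1)
--                 if end == -1:
--                     end = idx + 500
--                 best_match = memory_context[idx:end].strip()
--     return best_match
-- ===== SOURCE B (Python) =====
-- def _cut(memory_context, line, important_fallback):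
--     idx = memory_context.find(line)
--     end = memory_context.find("\nWhen ", idx + 1)
--     if end == -1 and important_fallback:
--         end = memory_context.find("\nImportant:", idx + 1)
--     if end == -1:
--         end = idx + 500
--     return memory_context[idx:end].strip()
--
--
-- def _find_matching_rule(memory_context, answer_type, negation_pattern):
--     """Two prioritized passes over the candidate rule lines instead of one stateful loop."""
--     if not answer_type:
--         return None
--     at = answer_type.lower()
--     rules = [ln for ln in memory_context.split("\n")
--              if ln.lower().strip().startswith("when answer_type=")
--              and at in ln.lower().strip()]
--     if negation_pattern:
--         neg = negation_pattern.replace("_", " ")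
--         exact = next((ln for ln in rules if neg in ln.lower().strip()), None)
--         if exact is not None:
--             return _cut(memory_context, exact, True)
--     if rules:
--         return _cut(memory_context, rules[0], False)
--     return None
-- ===== Notes on version B (the rewrite author's own statement) =====
-- stated objective: simpler
-- what changed: Replaced A's single stateful loop (best_match accumulator with break and an elif that must remember whether a partial match was already seen) by a declarative decomposition: filter the lines once into the candidate rule lines, then take the first exact match (answer_type + negation pattern) and only otherwise the first candidate, with the shared slice extraction factored into one helper.
import Mathlib
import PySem

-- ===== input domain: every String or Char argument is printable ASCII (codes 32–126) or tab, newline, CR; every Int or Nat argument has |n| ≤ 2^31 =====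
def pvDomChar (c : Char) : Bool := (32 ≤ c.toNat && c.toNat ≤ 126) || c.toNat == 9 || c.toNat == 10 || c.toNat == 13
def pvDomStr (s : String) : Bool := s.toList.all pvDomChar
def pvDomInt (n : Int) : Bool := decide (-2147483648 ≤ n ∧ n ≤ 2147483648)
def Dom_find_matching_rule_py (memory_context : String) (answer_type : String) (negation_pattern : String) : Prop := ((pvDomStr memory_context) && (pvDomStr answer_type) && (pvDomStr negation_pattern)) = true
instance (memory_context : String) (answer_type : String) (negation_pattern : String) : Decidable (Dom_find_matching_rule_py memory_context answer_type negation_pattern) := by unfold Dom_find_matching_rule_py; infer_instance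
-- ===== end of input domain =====

-- B replaces A's single stateful loop (best_match accumulator + break) by two prioritized
-- passes over a filtered list of candidate rule lines; objective: simpler. Return value only.

-- ===== PORT A =====
-- the for-loop over memory_context.split("\n") with the best_match accumulator and break
def pvA_loop (memory_context : String) (answer_type : String) (negation_pattern : String) :
    List String → Option String → Option String
  | [], best => best
  | line :: rest, best =>
    let line_lower := PySem.Str.strip (PySem.Str.lower line)
    if !(PySem.Str.startswith line_lower "when answer_type=") then
      pvA_loop memory_context answer_type negation_pattern rest best
    else if (answer_type != "") && PySem.Str.isIn (PySem.Str.lower answer_type) line_lower then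
      if (negation_pattern != "") &&
          PySem.Str.isIn (PySem.Str.replace negation_pattern "_" " ") line_lower then
        -- exact match: slice + break (the loop returns this value)
        let idx := PySem.Str.find memory_context line
        let e0 := PySem.Str.findFrom memory_context "\nWhen " (idx + 1) none
        let e1 := if e0 = -1 then PySem.Str.findFrom memory_context "\nImportant:" (idx + 1) none else e0
        let e2 := if e1 = -1 then idx + 500 else e1
        some (PySem.Str.strip (PySem.Str.slice memory_context (some idx) (some e2)))
      else
        match best with
        | none =>
          let idx := PySem.Str.find memory_context line
          let e0 := PySem.Str.findFrom memory_context "\nWhen " (idx + 1) none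
          let e2 := if e0 = -1 then idx + 500 else e0
          pvA_loop memory_context answer_type negation_pattern rest
            (some (PySem.Str.strip (PySem.Str.slice memory_context (some idx) (some e2))))
        | some b => pvA_loop memory_context answer_type negation_pattern rest (some b)
    else
      pvA_loop memory_context answer_type negation_pattern rest best

def find_matching_rule_py (memory_context : String) (answer_type : String) (negation_pattern : String) : Option String :=
  if memory_context = "" then none
  else
    pvA_loop memory_context answer_type negation_pattern
      ((PySem.Str.split? memory_context "\n").getD []) none

-- ===== PORT B =====
-- _cut(memory_context, line, important_fallback)
def pvB_cut (memory_context : String) (line : String) (important_fallback : Bool) : String :=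
  let idx := PySem.Str.find memory_context line
  let e0 := PySem.Str.findFrom memory_context "\nWhen " (idx + 1) none
  let e1 := if e0 = -1 ∧ important_fallback = true then
              PySem.Str.findFrom memory_context "\nImportant:" (idx + 1) none
            else e0
  let e2 := if e1 = -1 then idx + 500 else e1
  PySem.Str.strip (PySem.Str.slice memory_context (some idx) (some e2))

-- the comprehension's predicate: is this line a candidate rule for `at`?
def pvB_isRule (at_lower : String) (ln : String) : Bool :=
  PySem.Str.startswith (PySem.Str.strip (PySem.Str.lower ln)) "when answer_type=" &&
  PySem.Str.isIn at_lower (PySem.Str.strip (PySem.Str.lower ln))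

def pvB_isExact (neg : String) (ln : String) : Bool :=
  PySem.Str.isIn neg (PySem.Str.strip (PySem.Str.lower ln))

def find_matching_rule_py_alt (memory_context : String) (answer_type : String) (negation_pattern : String) : Option String :=
  if answer_type = "" then none
  else
    let rules := ((PySem.Str.split? memory_context "\n").getD []).filter
                   (pvB_isRule (PySem.Str.lower answer_type))
    let exact? : Option String :=
      if negation_pattern = "" then none
      else rules.find? (pvB_isExact (PySem.Str.replace negation_pattern "_" " "))
    match exact? with
    | some ln => some (pvB_cut memory_context ln true)
    | none =>
      match rules with
      | [] => none
      | ln :: _ => some (pvB_cut memory_context ln false)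

-- ===== PRECONDITION & SPEC =====
def Spec_find_matching_rule_py (memory_context : String) (answer_type : String) (negation_pattern : String) (out : Option String) : Prop := out = find_matching_rule_py_alt memory_context answer_type negation_pattern
instance (memory_context : String) (answer_type : String) (negation_pattern : String) (out : Option String) : Decidable (Spec_find_matching_rule_py memory_context answer_type negation_pattern out) := by unfold Spec_find_matching_rule_py; infer_instance

-- ===== CLAIM (what is proved, stated in full; the proofs are below) =====
def Claim_equal_find_matching_rule_py : Prop := ∀ (memory_context : String) (answer_type : String) (negation_pattern : String), Dom_find_matching_rule_py memory_context answer_type negation_pattern → Spec_find_matching_rule_py memory_context answer_type negation_pattern (find_matching_rule_py memory_context answer_type negation_pattern)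

-- ===== LEMMAS AND PROOFS =====

-- With an empty answer_type every line is skipped, so A's loop just returns its accumulator.
lemma pvA_loop_empty_at (mc np : String) (ls : List String) (best : Option String) :
    pvA_loop mc "" np ls best = best := by
  induction ls generalizing best with
  | nil => rfl
  | cons line rest ih =>
    simp only [pvA_loop]
    split
    · exact ih best
    · simp [ih]

-- Loop invariant: A's loop equals "first exact rule, else accumulator, else first rule".
lemma pvA_loop_eq (mc at_ np : String) (hat : at_ ≠ "") (ls : List String) (best : Option String) :
    pvA_loop mc at_ np ls best =
      match (if np = "" then none
             else (ls.filter (pvB_isRule (PySem.Str.lower at_))).find?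
                    (pvB_isExact (PySem.Str.replace np "_" " "))) with
      | some ln => some (pvB_cut mc ln true)
      | none =>
        match best with
        | some b => some b
        | none =>
          match ls.filter (pvB_isRule (PySem.Str.lower at_)) with
          | [] => none
          | ln :: _ => some (pvB_cut mc ln false) := by
  induction ls generalizing best with
  | nil => cases best <;> simp [pvA_loop]
  | cons line rest ih =>
    have hat' : (at_ != "") = true := by simpa using hat
    by_cases hsw : PySem.Str.startswith (PySem.Str.strip (PySem.Str.lower line)) "when answer_type=" = true
    · by_cases hin : PySem.Str.isIn (PySem.Str.lower at_) (PySem.Str.strip (PySem.Str.lower line)) = true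
      · -- line is a candidate rule
        have hrule : pvB_isRule (PySem.Str.lower at_) line = true := by
          simp at hsw hin ⊢; simp [pvB_isRule, hsw, hin]
        simp at hsw hin
        by_cases hnp : np = ""
        · -- no negation pattern: never exact
          subst hnp
          cases best with
          | none => simp [pvA_loop, hsw, hin, hat', hrule, ih, pvB_cut]
          | some b => simp [pvA_loop, hsw, hin, hat', ih]
        · have hnp' : (np != "") = true := by simpa using hnp
          by_cases hex : PySem.Str.isIn (PySem.Str.replace np "_" " ")
              (PySem.Str.strip (PySem.Str.lower line)) = true
          · -- exact match: break
            have hexact : pvB_isExact (PySem.Str.replace np "_" " ") line = true := by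
              simp at hex ⊢; simp [pvB_isExact, hex]
            simp at hex
            simp [pvA_loop, hsw, hin, hat', hnp', hnp, hex, hrule, hexact, pvB_cut]
          · -- partial match only
            have hexact : pvB_isExact (PySem.Str.replace np "_" " ") line = false := by
              simp at hex ⊢; simp [pvB_isExact, hex]
            simp at hex
            cases best with
            | none => simp [pvA_loop, hsw, hin, hat', hnp', hnp, hex, hrule, hexact, ih, pvB_cut]
            | some b => simp [pvA_loop, hsw, hin, hat', hnp', hnp, hex, hrule, hexact, ih]
      · -- answer_type not in line: skipped
        have hrule : pvB_isRule (PySem.Str.lower at_) line = false := by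
          simp at hin ⊢; simp [pvB_isRule, hin]
        simp at hsw hin
        simp [pvA_loop, hsw, hin, hrule, ih]
    · -- not a rule line: skipped
      have hrule : pvB_isRule (PySem.Str.lower at_) line = false := by
        simp at hsw ⊢; simp [pvB_isRule, hsw]
      simp at hsw
      simp [pvA_loop, hsw, hrule, ih]

-- On the empty context there are no candidate rule lines, so B also returns none.
lemma pvB_empty_mc (at_ np : String) : find_matching_rule_py_alt "" at_ np = none := by
  by_cases h : at_ = ""
  · simp [find_matching_rule_py_alt, h]
  · have hline : pvB_isRule (PySem.Str.lower at_) "" = false := by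
      simp [pvB_isRule]
      intro h'
      exact absurd h' (by decide)
    simp [find_matching_rule_py_alt, h, show (PySem.Str.split? "" "\n").getD [] = [""] from by decide, hline]

-- ===== VERDICT (by name: the statement is the Claim_ definition above) =====
theorem find_matching_rule_py_spec : Claim_equal_find_matching_rule_py := by
  intro mc at_ np _
  unfold Spec_find_matching_rule_py
  by_cases hmc : mc = ""
  · subst hmc
    simp [find_matching_rule_py, pvB_empty_mc]
  · by_cases hat : at_ = ""
    · subst hat
      simp [find_matching_rule_py, find_matching_rule_py_alt, hmc, pvA_loop_empty_at]
    · rw [show find_matching_rule_py mc at_ np =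
          pvA_loop mc at_ np ((PySem.Str.split? mc "\n").getD []) none from by
        simp [find_matching_rule_py, hmc]]
      rw [pvA_loop_eq mc at_ np hat]
      simp only [find_matching_rule_py_alt, hat, if_false]
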